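-- pv_equiv track=rewrite | github.com/malik-ali/generative-grading | src/datasets/citizenship_labels.py | _get_tiers
-- ===== SOURCE A (Python) =====
-- from collections import Counter, OrderedDict
--
-- def _get_tiers(inputs):
--     counter = Counter()
--     for text in inputs:
--         counter[text] += 1
--     tiers = {}
--     for text, val in counter.items():
--         # head = 0, tail = 1
--         tiers[text] = 0 if (val > 1) else 1
--     return tiers
-- ===== SOURCE B (Python) =====
-- def _get_tiers(inputs):
--     tiers = {}
--     for text in inputs:
--         # dict doubles as membership tracker: repeat -> 0, first sighting -> 1
--         tiers[text] = 0 if text in tiers else 1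
--     return tiers
-- ===== Notes on version B (the rewrite author's own statement) =====
-- stated objective: simpler
-- what changed: Replaces the Counter pass plus a separate labeling loop with a single pass that uses the output dict itself as the membership tracker (already a key -> 0, first sighting -> 1).
import Mathlib
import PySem

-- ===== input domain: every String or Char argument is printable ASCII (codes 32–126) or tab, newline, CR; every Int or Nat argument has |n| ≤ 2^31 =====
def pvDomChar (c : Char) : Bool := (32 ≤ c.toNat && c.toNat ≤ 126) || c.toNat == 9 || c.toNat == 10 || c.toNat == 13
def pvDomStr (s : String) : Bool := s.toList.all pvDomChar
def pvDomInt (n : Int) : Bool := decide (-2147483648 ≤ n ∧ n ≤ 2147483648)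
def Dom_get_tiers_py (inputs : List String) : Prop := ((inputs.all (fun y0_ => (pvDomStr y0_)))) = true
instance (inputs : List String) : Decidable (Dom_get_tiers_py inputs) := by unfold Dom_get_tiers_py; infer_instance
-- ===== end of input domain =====

-- B replaces A's Counter pass + separate labeling loop with ONE pass that uses the
-- output dict itself as the membership tracker (simpler decomposition, same cost).

-- ===== PORT A =====
def get_tiers_py (inputs : List String) : List (String × Int) :=
  -- counter = Counter(); for text in inputs: counter[text] += 1
  let counter : PySem.Dict String Int :=
    inputs.foldl (fun c text => c.modify text 0 (· + 1)) PySem.Dict.empty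
  -- tiers = {}; for text, val in counter.items(): tiers[text] = 0 if (val > 1) else 1
  let tiers : PySem.Dict String Int :=
    counter.items.foldl (fun t p => t.insert p.1 (if 1 < p.2 then 0 else 1)) PySem.Dict.empty
  tiers.items

-- ===== PORT B =====
def get_tiers_py_alt (inputs : List String) : List (String × Int) :=
  -- tiers = {}; for text in inputs: tiers[text] = 0 if text in tiers else 1
  let tiers : PySem.Dict String Int :=
    inputs.foldl (fun t text => t.insert text (if t.contains text then 0 else 1)) PySem.Dict.empty
  tiers.items

-- ===== PRECONDITION & SPEC =====
def Spec_get_tiers_py (inputs : List String) (out : List (String × Int)) : Prop := out = get_tiers_py_alt inputs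
instance (inputs : List String) (out : List (String × Int)) : Decidable (Spec_get_tiers_py inputs out) := by unfold Spec_get_tiers_py; infer_instance

-- ===== CLAIM (what is proved, stated in full; the proofs are below) =====
def Claim_equal_get_tiers_py : Prop := ∀ (inputs : List String), Dom_get_tiers_py inputs → Spec_get_tiers_py inputs (get_tiers_py inputs)

-- ===== LEMMAS AND PROOFS =====

-- The common shape of both results: distinct texts in first-occurrence order, labeled
-- 0 when the text repeats in `inputs` and 1 otherwise.
def tierSpec (inputs : List String) : List (String × Int) :=
  (PySem.Set.ofList inputs).map (fun k => (k, if 1 < inputs.count k then (0 : Int) else 1))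

lemma a_eq_spec (inputs : List String) : get_tiers_py inputs = tierSpec inputs := by
  simp only [get_tiers_py]
  rw [show (inputs.foldl (fun c text => c.modify text 0 (· + 1)) PySem.Dict.empty)
      = PySem.Dict.counter inputs from (PySem.Dict.counter_eq_foldl inputs).symm,
    PySem.Dict.items_foldl_insert_fresh (PySem.Dict.counter inputs).items
      (Prod.fst (α := String) (β := Int)) (fun p => if 1 < p.2 then (0:Int) else 1)
      PySem.Dict.empty (fun a _ => PySem.Dict.contains_empty _)
      (by
        have : (PySem.Dict.counter inputs).items.map (·.1) = (PySem.Dict.counter inputs).keys := rfl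
        rw [this, PySem.Dict.keys_counter]
        exact PySem.Set.nodup_ofList inputs)]
  rw [PySem.Dict.items_counter, tierSpec, List.map_map,
    show (PySem.Dict.empty : PySem.Dict String Int).items = [] from rfl, List.nil_append]
  refine List.map_congr_left (fun k _ => ?_)
  simp only [Function.comp]
  by_cases h : 1 < inputs.count k
  · rw [if_pos (by exact_mod_cast h), if_pos (by exact_mod_cast h)]
  · rw [if_neg (by exact_mod_cast h), if_neg (by exact_mod_cast h)]

lemma b_fold_items (l : List String) :
    (l.foldl (fun t text => t.insert text (if t.contains text then 0 else 1))
        (PySem.Dict.empty : PySem.Dict String Int)).items = tierSpec l := by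
  induction l using List.reverseRecOn with
  | nil => rfl
  | append_singleton l x ih =>
    rw [List.foldl_append, List.foldl_cons, List.foldl_nil]
    have hkeys : (l.foldl (fun t text => t.insert text (if t.contains text then 0 else 1))
        (PySem.Dict.empty : PySem.Dict String Int)).keys = PySem.Set.ofList l := by
      rw [PySem.Dict.keys_foldl_insert]; rfl
    have hcont : (l.foldl (fun t text => t.insert text (if t.contains text then 0 else 1))
        (PySem.Dict.empty : PySem.Dict String Int)).contains x = decide (x ∈ l) := by
      rw [PySem.Dict.contains_eq_decide_mem_keys, hkeys]
      simp [PySem.Set.mem_ofList]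
    have hofl : PySem.Set.ofList (l ++ [x]) = PySem.Set.add (PySem.Set.ofList l) x := by
      rw [PySem.Set.ofList_eq_foldl, PySem.Set.ofList_eq_foldl, List.foldl_append,
        List.foldl_cons, List.foldl_nil]
    by_cases hx : x ∈ l
    · rw [hcont, if_pos (by simpa using hx)]
      rw [PySem.Dict.items_insert_of_contains _ _ (by rw [hcont]; simpa using hx), ih]
      rw [tierSpec, tierSpec, hofl, PySem.Set.add_of_mem (by simpa [PySem.Set.mem_ofList] using hx),
        List.map_map]
      refine List.map_congr_left (fun k hk => ?_)
      simp only [Function.comp]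
      by_cases hkx : k = x
      · subst hkx
        have h1 : 1 ≤ l.count k := List.one_le_count_iff.mpr hx
        rw [if_pos (by simp), List.count_append]
        simp [Nat.lt_of_lt_of_le Nat.one_lt_two (by omega : 2 ≤ l.count k + 1)]
      · have : ((k, if 1 < l.count k then (0:Int) else 1).1 == x) = false := by
          simpa using hkx
        rw [this]
        simp only [Bool.false_eq_true, if_false, List.count_append]
        have : [x].count k = 0 := List.count_eq_zero.mpr (by simp [hkx])
        rw [this, Nat.add_zero]
    · rw [hcont, if_neg (by simpa using hx)]
      rw [PySem.Dict.items_insert_of_not_contains _ _ (by rw [hcont]; simpa using hx), ih]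
      rw [tierSpec, tierSpec, hofl,
        PySem.Set.add_of_not_mem (by simpa [PySem.Set.mem_ofList] using hx), List.map_append]
      congr 1
      · refine List.map_congr_left (fun k hk => ?_)
        have hkx : k ≠ x := by
          intro h; exact hx (by simpa [PySem.Set.mem_ofList, h] using hk)
        rw [List.count_append]
        have : [x].count k = 0 := List.count_eq_zero.mpr (by simp [hkx])
        rw [this, Nat.add_zero]
      · have : (l ++ [x]).count x = 1 + l.count x := by
          rw [List.count_append]; simp [Nat.add_comm]
        simp only [List.map_cons, List.map_nil, this]
        have hc0 : l.count x = 0 := List.count_eq_zero.mpr hx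
        rw [hc0]
        norm_num

lemma b_eq_spec (inputs : List String) : get_tiers_py_alt inputs = tierSpec inputs :=
  b_fold_items inputs

-- ===== VERDICT (by name: the statement is the Claim_ definition above) =====
theorem get_tiers_py_spec : Claim_equal_get_tiers_py := by
  intro inputs _
  unfold Spec_get_tiers_py
  rw [a_eq_spec, b_eq_spec]
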